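-- pv_equiv track=rewrite | github.com/NVIDIA/GenerativeAIExamples | experimental/AzureML/trt_llm_azureml.py | _trim_batch_response
-- ===== SOURCE A (Python) =====
-- def _trim_batch_response(result_str: str) -> str:
--     """Trim the resulting response from a batch request by removing provided prompt and extra generated text."""
--     # extract the generated part of the prompt
--     assistant_block = False
--     generated = []
--     for line in result_str.split("\n"):
--         if assistant_block:
--             if line == "User":
--                 break
--             generated += [line]
--             continue
--
--         if line == "Assistant":
--             assistant_block = True
--
--     return "\n".join(generated).strip()
-- ===== SOURCE B (Python) =====
-- def _trim_batch_response(result_str: str) -> str: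
--     """Find-boundaries-then-slice: locate the first exact 'Assistant' line, take the
--     lines after it up to the first exact 'User' line, join and strip."""
--     lines = result_str.split("\n")
--     if "Assistant" not in lines:
--         return ""
--     tail = lines[lines.index("Assistant") + 1:]
--     if "User" in tail:
--         tail = tail[:tail.index("User")]
--     return "\n".join(tail).strip()
-- ===== Notes on version B (the rewrite author's own statement) =====
-- stated objective: simpler
-- what changed: Replaces the boolean state-machine loop that accumulates lines one by one with a find-boundaries-then-slice decomposition: locate the first assistant marker line, slice the tail, cut it at the first user marker line, then join and strip.
import Mathlib
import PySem

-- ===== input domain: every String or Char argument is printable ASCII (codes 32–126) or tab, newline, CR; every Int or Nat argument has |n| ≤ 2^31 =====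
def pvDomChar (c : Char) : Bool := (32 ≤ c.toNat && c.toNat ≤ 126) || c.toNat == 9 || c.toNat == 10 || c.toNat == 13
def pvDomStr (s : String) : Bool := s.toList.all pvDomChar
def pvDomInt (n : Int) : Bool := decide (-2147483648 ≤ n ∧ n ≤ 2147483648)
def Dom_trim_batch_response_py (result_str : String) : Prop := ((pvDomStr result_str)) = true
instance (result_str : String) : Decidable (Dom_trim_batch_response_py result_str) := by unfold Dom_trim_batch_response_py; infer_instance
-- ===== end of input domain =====

-- B replaces A's boolean state-machine accumulation loop by a find-the-boundary-lines-then-slice decomposition (objective: simpler).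

-- ===== PORT A =====
-- the for-loop over the split lines, state = (assistant_block, generated); 'break' = returning the accumulator
def trimLoopA : List String → Bool → List String → List String
  | [], _, gen => gen
  | l :: ls, ab, gen =>
    if ab then
      if l = "User" then gen
      else trimLoopA ls ab (gen ++ [l])
    else
      if l = "Assistant" then trimLoopA ls true gen
      else trimLoopA ls false gen

def trim_batch_response_py (result_str : String) : String :=
  PySem.Str.strip (PySem.Str.join "\n"
    (trimLoopA ((PySem.Str.split? result_str "\n").getD []) false []))

-- ===== PORT B =====
def trim_batch_response_py_alt (result_str : String) : String :=
  let lines := (PySem.Str.split? result_str "\n").getD []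
  if "Assistant" ∉ lines then ""
  else
    let tail := lines.drop (((PySem.List.index? lines "Assistant").getD 0) + 1)
    let tail2 := if "User" ∈ tail then tail.take ((PySem.List.index? tail "User").getD 0) else tail
    PySem.Str.strip (PySem.Str.join "\n" tail2)

-- ===== PRECONDITION & SPEC =====
def Spec_trim_batch_response_py (result_str : String) (out : String) : Prop := out = trim_batch_response_py_alt result_str
instance (result_str : String) (out : String) : Decidable (Spec_trim_batch_response_py result_str out) := by unfold Spec_trim_batch_response_py; infer_instance

-- ===== CLAIM (what is proved, stated in full; the proofs are below) =====
def Claim_equal_trim_batch_response_py : Prop := ∀ (result_str : String), Dom_trim_batch_response_py result_str → Spec_trim_batch_response_py result_str (trim_batch_response_py result_str)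

-- ===== LEMMAS AND PROOFS =====

-- once assistant_block is true, the loop collects exactly the lines up to the first "User" line
theorem trimLoopA_true (ls : List String) : ∀ gen : List String,
    trimLoopA ls true gen =
      gen ++ (if "User" ∈ ls then ls.take ((PySem.List.index? ls "User").getD 0) else ls) := by
  induction ls with
  | nil => intro gen; simp [trimLoopA]
  | cons l ls ih =>
    intro gen
    by_cases hU : l = "User"
    · subst hU
      rw [PySem.List.index?_cons_self]
      simp [trimLoopA]
    · rw [PySem.List.index?_cons_of_ne ls hU]
      simp only [trimLoopA, if_neg hU, ih (gen ++ [l]), List.mem_cons]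
      by_cases hm : "User" ∈ ls
      · obtain ⟨k, hk⟩ := Option.isSome_iff_exists.mp (List.isSome_idxOf?.mpr hm)
        simp [hm, hk, Ne.symm hU, List.take_succ_cons]
      · simp [hm, Ne.symm hU]

-- before "Assistant" is seen, the loop is a search for the first "Assistant" line
theorem trimLoopA_false (ls : List String) :
    trimLoopA ls false [] =
      (if "Assistant" ∈ ls then
        (let tail := ls.drop (((PySem.List.index? ls "Assistant").getD 0) + 1)
         if "User" ∈ tail then tail.take ((PySem.List.index? tail "User").getD 0) else tail)
       else []) := by
  induction ls with
  | nil => simp [trimLoopA]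
  | cons l ls ih =>
    by_cases hA : l = "Assistant"
    · subst hA
      rw [show trimLoopA ("Assistant" :: ls) false [] = trimLoopA ls true [] from by
            simp [trimLoopA],
          trimLoopA_true ls [], PySem.List.index?_cons_self]
      simp
    · rw [show trimLoopA (l :: ls) false [] = trimLoopA ls false [] from by
            simp [trimLoopA, hA],
          ih, PySem.List.index?_cons_of_ne ls hA]
      by_cases hm : "Assistant" ∈ ls
      · obtain ⟨k, hk⟩ := Option.isSome_iff_exists.mp (List.isSome_idxOf?.mpr hm)
        simp [hm, hk, Ne.symm hA]
      · simp [hm, Ne.symm hA]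

-- ===== VERDICT (by name: the statement is the Claim_ definition above) =====
theorem trim_batch_response_py_spec : Claim_equal_trim_batch_response_py := by
  intro s _
  unfold Spec_trim_batch_response_py trim_batch_response_py trim_batch_response_py_alt
  rw [trimLoopA_false]
  by_cases hm : "Assistant" ∈ (PySem.Str.split? s "\n").getD []
  · simp [hm]
  · rw [if_neg hm, if_pos hm]
    decide
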